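-- pv_equiv track=rewrite | github.com/psvishnu91/interview-problems | leetcode/1856-maximum-subarray-min-product.py | max_sum_min_pdct
-- ===== SOURCE A (Python) =====
-- from queue import deque
--
-- def max_sum_min_pdct(nums):
--     if not nums:
--         return 0
--     n = len(nums)
--     stk = deque()
--     lt, rt, = [
--         None
--     ] * n, [None] * n
--     ps = build_ps(nums)
--     for i, num in enumerate(nums):
--         while stk and stk[-1][1] >= num:
--             stk.pop()
--         lt[i] = 0 if not stk else stk[-1][0] + 1
--         stk.append((i, num))
--     stk.clear()
--     for i, num in reversed(list(enumerate(nums))):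
--         while stk and stk[-1][1] >= num:
--             stk.pop()
--         rt[i] = n - 1 if not stk else stk[-1][0] - 1
--         stk.append((i, num))
--     max_min_prod = 0
--     for i in range(n):
--         max_min_prod = max(
--             max_min_prod, nums[i] * (ps[rt[i]] - ps[lt[i]] + nums[lt[i]])
--         )
--     return max_min_prod % (10**9 + 7)
--
-- def build_ps(nums):
--     ps = [None] * len(nums)
--     rs = 0
--     for i, num in enumerate(nums):
--         rs += num
--         ps[i] = rs
--     return ps
-- ===== SOURCE B (Python) =====
-- def max_sum_min_pdct(nums):
--     n = len(nums)
--     best = 0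
--     for i, v in enumerate(nums):
--         l = i
--         while l > 0 and nums[l - 1] >= v:
--             l -= 1
--         r = i
--         while r < n - 1 and nums[r + 1] >= v:
--             r += 1
--         best = max(best, v * sum(nums[l:r + 1]))
--     return best % (10 ** 9 + 7)
-- ===== Notes on version B (the rewrite author's own statement) =====
-- stated objective: simpler
-- what changed: A's two monotonic-stack passes plus a prefix-sum array are replaced by a single loop that, for each element, finds its maximal >=-interval by direct left/right scans and sums that slice directly.
import Mathlib
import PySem

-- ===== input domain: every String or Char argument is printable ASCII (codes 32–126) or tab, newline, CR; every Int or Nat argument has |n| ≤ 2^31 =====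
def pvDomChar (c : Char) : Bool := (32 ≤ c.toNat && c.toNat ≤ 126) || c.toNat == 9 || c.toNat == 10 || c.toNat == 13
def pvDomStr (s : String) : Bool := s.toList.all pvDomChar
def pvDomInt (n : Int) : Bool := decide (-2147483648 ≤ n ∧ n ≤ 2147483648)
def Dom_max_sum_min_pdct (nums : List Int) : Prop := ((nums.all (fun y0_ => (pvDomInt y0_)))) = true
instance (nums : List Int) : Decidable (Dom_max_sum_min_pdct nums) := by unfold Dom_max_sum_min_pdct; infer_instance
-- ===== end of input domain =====

-- B replaces A's two monotonic-stack passes + prefix-sum array by a direct per-element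
-- scan to the maximal ≥-interval (simpler decomposition; not faster: O(n²) worst case vs A's O(n)).

-- ===== PORT A =====
-- while stk and stk[-1][1] >= num: stk.pop()   (stack head = Python stk[-1])
def popGe (num : Int) : List (Nat × Int) → List (Nat × Int)
  | [] => []
  | (j, v) :: rest => if num ≤ v then popGe num rest else (j, v) :: rest

def build_ps (nums : List Int) : List Int :=
  (nums.foldl (fun (st : List Int × Int) num => (st.1 ++ [st.2 + num], st.2 + num)) ([], 0)).1

-- loop indices are Nat (Python's enumerate/range indices here are always ≥ 0; all list
-- indexing below is in range, so List.getD is exact)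
def max_sum_min_pdct (nums : List Int) : Int :=
  if nums = [] then 0
  else
    let n := nums.length
    let ps := build_ps nums
    let fw := (List.range n).foldl
      (fun (st : List (Nat × Int) × List Nat) i =>
        let num := nums.getD i 0
        let stk := popGe num st.1
        let l : Nat := match stk with | [] => 0 | (j, _) :: _ => j + 1
        ((i, num) :: stk, st.2 ++ [l])) ([], [])
    let lt := fw.2
    let bw := (List.range n).reverse.foldl
      (fun (st : List (Nat × Int) × List Nat) i =>
        let num := nums.getD i 0
        let stk := popGe num st.1
        let r : Nat := match stk with | [] => n - 1 | (j, _) :: _ => j - 1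
        ((i, num) :: stk, r :: st.2)) ([], [])
    let rt := bw.2
    let best := (List.range n).foldl
      (fun best i => max best (nums.getD i 0 *
        (ps.getD (rt.getD i 0) 0 - ps.getD (lt.getD i 0) 0 + nums.getD (lt.getD i 0) 0))) 0
    PySem.Int.mod best (10 ^ 9 + 7)

-- ===== PORT B =====
-- while l > 0 and nums[l-1] >= v: l -= 1
def lscan (nums : List Int) (v : Int) : Nat → Nat
  | 0 => 0
  | l + 1 => if v ≤ nums.getD l 0 then lscan nums v l else l + 1

-- while r < n-1 and nums[r+1] >= v: r += 1
def rscan (nums : List Int) (v : Int) (r : Nat) : Nat :=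
  if h : r + 1 < nums.length ∧ v ≤ nums.getD (r + 1) 0 then rscan nums v (r + 1) else r
termination_by nums.length - r
decreasing_by omega

def max_sum_min_pdct_alt (nums : List Int) : Int :=
  let best := (List.range nums.length).foldl
    (fun best i =>
      let v := nums.getD i 0
      let l := lscan nums v i
      let r := rscan nums v i
      max best (v * ((nums.drop l).take (r + 1 - l)).sum)) 0
  PySem.Int.mod best (10 ^ 9 + 7)

-- ===== PRECONDITION & SPEC =====
def Spec_max_sum_min_pdct (nums : List Int) (out : Int) : Prop := out = max_sum_min_pdct_alt nums
instance (nums : List Int) (out : Int) : Decidable (Spec_max_sum_min_pdct nums out) := by unfold Spec_max_sum_min_pdct; infer_instance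

-- ===== CLAIM (what is proved, stated in full; the proofs are below) =====
def Claim_equal_max_sum_min_pdct : Prop := ∀ (nums : List Int), Dom_max_sum_min_pdct nums → Spec_max_sum_min_pdct nums (max_sum_min_pdct nums)

-- ===== LEMMAS AND PROOFS =====

-- The stack of A's forward pass after processing indices 0..i-1.
def stackSpec (nums : List Int) : Nat → List (Nat × Int)
  | 0 => []
  | i + 1 => (i, nums.getD i 0) :: popGe (nums.getD i 0) (stackSpec nums i)

-- The stack of A's backward pass after processing indices n-1, …, n-k.
def stackSpecR (nums : List Int) : Nat → List (Nat × Int)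
  | 0 => []
  | k + 1 =>
    let i := nums.length - 1 - k
    (i, nums.getD i 0) :: popGe (nums.getD i 0) (stackSpecR nums k)

-- A's lt[i] and rt[i] as functions of the index.
def ltA (nums : List Int) (i : Nat) : Nat :=
  match popGe (nums.getD i 0) (stackSpec nums i) with
  | [] => 0
  | (j, _) :: _ => j + 1

def rtA (nums : List Int) (i : Nat) : Nat :=
  match popGe (nums.getD i 0) (stackSpecR nums (nums.length - 1 - i)) with
  | [] => nums.length - 1
  | (j, _) :: _ => j - 1

theorem popGe_popGe (v w : Int) (h : v ≤ w) (L : List (Nat × Int)) :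
    popGe v (popGe w L) = popGe v L := by
  induction L with
  | nil => rfl
  | cons p rest ih =>
    obtain ⟨j, x⟩ := p
    by_cases hw : w ≤ x
    · simp [popGe, hw, ih, le_trans h hw]
    · simp [popGe, hw]

theorem popGe_stackSpec_spec (nums : List Int) (i : Nat) (v : Int) :
    (popGe v (stackSpec nums i) = [] → ∀ m, m < i → v ≤ nums.getD m 0) ∧
    (∀ j x rest, popGe v (stackSpec nums i) = (j, x) :: rest →
      j < i ∧ ¬ v ≤ nums.getD j 0 ∧ ∀ m, j < m → m < i → v ≤ nums.getD m 0) := by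
  induction i with
  | zero => simp [stackSpec, popGe]
  | succ n ih =>
    by_cases hv : v ≤ nums.getD n 0
    · have key : popGe v (stackSpec nums (n + 1)) = popGe v (stackSpec nums n) := by
        rw [stackSpec]
        simp only [popGe, if_pos hv]
        exact popGe_popGe v _ hv _
      rw [key]
      constructor
      · intro he m hm
        rcases Nat.lt_or_ge m n with h | h
        · exact ih.1 he m h
        · have : m = n := by omega
          subst this; exact hv
      · intro j x rest hc
        obtain ⟨h1, h2, h3⟩ := ih.2 j x rest hc
        refine ⟨by omega, h2, fun m hm1 hm2 => ?_⟩
        rcases Nat.lt_or_ge m n with h | h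
        · exact h3 m hm1 h
        · have : m = n := by omega
          subst this; exact hv
    · have key : popGe v (stackSpec nums (n + 1)) =
          (n, nums.getD n 0) :: popGe (nums.getD n 0) (stackSpec nums n) := by
        rw [stackSpec]
        simp only [popGe, if_neg hv]
      rw [key]
      constructor
      · intro he; exact absurd he (by simp)
      · intro j x rest hc
        injection hc with h1 h2
        injection h1 with hj hx
        subst hj
        exact ⟨by omega, hv, fun m hm1 hm2 => by omega⟩

theorem lscan_le (nums : List Int) (v : Int) (i : Nat) : lscan nums v i ≤ i := by
  induction i with
  | zero => simp [lscan]
  | succ l ih =>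
    rw [lscan]
    split
    · omega
    · omega

theorem lscan_spec (nums : List Int) (v : Int) (i : Nat) :
    (∀ m, lscan nums v i ≤ m → m < i → v ≤ nums.getD m 0) ∧
    (lscan nums v i = 0 ∨ ¬ v ≤ nums.getD (lscan nums v i - 1) 0) := by
  induction i with
  | zero => simp [lscan]
  | succ l ih =>
    by_cases hc : v ≤ nums.getD l 0
    · rw [lscan, if_pos hc]
      refine ⟨fun m h1 h2 => ?_, ih.2⟩
      rcases Nat.lt_or_ge m l with h | h
      · exact ih.1 m h1 h
      · have : m = l := by omega
        subst this; exact hc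
    · rw [lscan, if_neg hc]
      exact ⟨fun m h1 h2 => by omega, Or.inr (by simpa using hc)⟩

theorem ltA_eq_lscan (nums : List Int) (i : Nat) :
    ltA nums i = lscan nums (nums.getD i 0) i := by
  set v := nums.getD i 0 with hv
  have hls := lscan_spec nums v i
  have hle := lscan_le nums v i
  have hss := popGe_stackSpec_spec nums i v
  rw [ltA]
  cases hp : popGe v (stackSpec nums i) with
  | nil =>
    have hall := hss.1 hp
    have h0 : lscan nums v i = 0 := by
      rcases hls.2 with h0 | hns
      · exact h0
      · by_cases h : lscan nums v i = 0
        · exact h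
        · exact absurd (hall (lscan nums v i - 1) (by omega)) hns
    simp [h0]
  | cons p rest =>
    obtain ⟨j, x⟩ := p
    obtain ⟨h1, h2, h3⟩ := hss.2 j x rest hp
    by_cases hlj : lscan nums v i ≤ j
    · exact absurd (hls.1 j hlj h1) h2
    · rcases hls.2 with h0 | hns
      · omega
      · by_cases hgt : lscan nums v i ≥ j + 2
        · exact absurd (h3 (lscan nums v i - 1) (by omega) (by omega)) hns
        · simp; omega

theorem popGe_stackSpecR_spec (nums : List Int) (k : Nat) (hk : k ≤ nums.length) (v : Int) :
    (popGe v (stackSpecR nums k) = [] → ∀ m, nums.length - k ≤ m → m < nums.length → v ≤ nums.getD m 0) ∧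
    (∀ j x rest, popGe v (stackSpecR nums k) = (j, x) :: rest →
      nums.length - k ≤ j ∧ j < nums.length ∧ ¬ v ≤ nums.getD j 0 ∧
        ∀ m, nums.length - k ≤ m → m < j → v ≤ nums.getD m 0) := by
  induction k with
  | zero => constructor
            · intro _ m h1 h2; omega
            · intro j x rest hc; exact absurd hc (by simp [stackSpecR, popGe])
  | succ n ih =>
    have ihn := ih (by omega)
    by_cases hv : v ≤ nums.getD (nums.length - 1 - n) 0
    · have key : popGe v (stackSpecR nums (n + 1)) = popGe v (stackSpecR nums n) := by
        rw [stackSpecR]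
        simp only [popGe]
        rw [if_pos hv]
        exact popGe_popGe v _ hv _
      rw [key]
      constructor
      · intro he m hm1 hm2
        rcases Nat.lt_or_ge m (nums.length - n) with h | h
        · have : m = nums.length - 1 - n := by omega
          subst this; exact hv
        · exact ihn.1 he m h hm2
      · intro j x rest hc
        obtain ⟨h1, h2, h3, h4⟩ := ihn.2 j x rest hc
        refine ⟨by omega, h2, h3, fun m hm1 hm2 => ?_⟩
        rcases Nat.lt_or_ge m (nums.length - n) with h | h
        · have : m = nums.length - 1 - n := by omega
          subst this; exact hv
        · exact h4 m h hm2
    · have key : popGe v (stackSpecR nums (n + 1)) =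
          (nums.length - 1 - n, nums.getD (nums.length - 1 - n) 0) ::
            popGe (nums.getD (nums.length - 1 - n) 0) (stackSpecR nums n) := by
        rw [stackSpecR]
        simp only [popGe]
        rw [if_neg hv]
      rw [key]
      constructor
      · intro he; exact absurd he (by simp)
      · intro j x rest hc
        injection hc with h1 h2
        injection h1 with hj hx
        subst hj
        exact ⟨by omega, by omega, hv, fun m hm1 hm2 => by omega⟩

theorem rscan_spec (nums : List Int) (v : Int) (r : Nat) (hr : r < nums.length) :
    r ≤ rscan nums v r ∧ rscan nums v r < nums.length ∧
    (∀ m, r < m → m ≤ rscan nums v r → v ≤ nums.getD m 0) ∧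
    (rscan nums v r = nums.length - 1 ∨ ¬ v ≤ nums.getD (rscan nums v r + 1) 0) := by
  have main : ∀ fuel r, nums.length - r ≤ fuel → r < nums.length →
      r ≤ rscan nums v r ∧ rscan nums v r < nums.length ∧
      (∀ m, r < m → m ≤ rscan nums v r → v ≤ nums.getD m 0) ∧
      (rscan nums v r = nums.length - 1 ∨ ¬ v ≤ nums.getD (rscan nums v r + 1) 0) := by
    intro fuel
    induction fuel with
    | zero => intro r h1 h2; omega
    | succ f ih =>
      intro r h1 h2
      rw [rscan]
      split
      · rename_i h
        obtain ⟨hlt, hle⟩ := h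
        have := ih (r + 1) (by omega) hlt
        refine ⟨by omega, this.2.1, fun m hm1 hm2 => ?_, this.2.2.2⟩
        rcases Nat.lt_or_ge r (m - 1) with h | h
        · exact this.2.2.1 m (by omega) hm2
        · have : m = r + 1 := by omega
          subst this; exact hle
      · rename_i h
        refine ⟨le_refl r, h2, fun m hm1 hm2 => by omega, ?_⟩
        by_cases hc : r + 1 < nums.length
        · exact Or.inr (fun hv => h ⟨hc, hv⟩)
        · exact Or.inl (by omega)
  exact main (nums.length - r) r (le_refl _) hr

theorem rtA_eq_rscan (nums : List Int) (i : Nat) (hi : i < nums.length) :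
    rtA nums i = rscan nums (nums.getD i 0) i := by
  set v := nums.getD i 0 with hv
  obtain ⟨hr1, hr2, hr3, hr4⟩ := rscan_spec nums v i hi
  have hss := popGe_stackSpecR_spec nums (nums.length - 1 - i) (by omega) v
  have hnk : nums.length - (nums.length - 1 - i) = i + 1 := by omega
  rw [rtA]
  cases hp : popGe v (stackSpecR nums (nums.length - 1 - i)) with
  | nil =>
    have hall := hss.1 hp
    rw [hnk] at hall
    have : rscan nums v i = nums.length - 1 := by
      rcases hr4 with h | hns
      · exact h
      · by_cases hlt : rscan nums v i < nums.length - 1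
        · exact absurd (hall (rscan nums v i + 1) (by omega) (by omega)) hns
        · omega
    simp [this]
  | cons p rest =>
    obtain ⟨j, x⟩ := p
    obtain ⟨h1, h2, h3, h4⟩ := hss.2 j x rest hp
    rw [hnk] at h1 h4
    by_cases hrj : j ≤ rscan nums v i
    · exact absurd (hr3 j (by omega) hrj) h3
    · have : rscan nums v i = j - 1 := by
        by_cases hlt : rscan nums v i < j - 1
        · rcases hr4 with h | hns
          · omega
          · exact absurd (h4 (rscan nums v i + 1) (by omega) (by omega)) hns
        · omega
      simp [this]

theorem forward_fold (nums : List Int) (i : Nat) :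
    (List.range i).foldl
      (fun (st : List (Nat × Int) × List Nat) i =>
        let num := nums.getD i 0
        let stk := popGe num st.1
        let l : Nat := match stk with | [] => 0 | (j, _) :: _ => j + 1
        ((i, num) :: stk, st.2 ++ [l])) ([], [])
      = (stackSpec nums i, (List.range i).map (ltA nums)) := by
  induction i with
  | zero => simp [stackSpec]
  | succ n ih =>
    rw [List.range_succ, List.foldl_append, ih]
    simp [stackSpec, ltA]

theorem backward_fold_aux (nums : List Int) (k : Nat) (hk : k ≤ nums.length) :
    ((List.range' (nums.length - k) k).reverse).foldl
      (fun (st : List (Nat × Int) × List Nat) i =>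
        let num := nums.getD i 0
        let stk := popGe num st.1
        let r : Nat := match stk with | [] => nums.length - 1 | (j, _) :: _ => j - 1
        ((i, num) :: stk, r :: st.2)) ([], [])
      = (stackSpecR nums k, (List.range' (nums.length - k) k).map (rtA nums)) := by
  induction k with
  | zero => simp [stackSpecR]
  | succ n ih =>
    have h1 : List.range' (nums.length - (n + 1)) (n + 1)
        = (nums.length - (n + 1)) :: List.range' (nums.length - n) n := by
      have h2 : nums.length - (n + 1) + 1 = nums.length - n := by omega
      rw [List.range'_succ, h2]
    rw [h1, List.reverse_cons, List.foldl_append, ih (by omega)]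
    have hi0 : nums.length - 1 - n = nums.length - (n + 1) := by omega
    have hk2 : nums.length - 1 - (nums.length - (n + 1)) = n := by omega
    simp only [List.foldl_cons, List.foldl_nil, List.map_cons, Prod.mk.injEq]
    constructor
    · rw [stackSpecR]
      simp only [hi0]
    · rw [rtA, hk2]

theorem build_ps_aux (l : List Int) (acc : List Int) (s : Int) :
    l.foldl (fun (st : List Int × Int) num => (st.1 ++ [st.2 + num], st.2 + num)) (acc, s)
      = (acc ++ (List.range l.length).map (fun k => s + (l.take (k+1)).sum), s + l.sum) := by
  induction l generalizing acc s with
  | nil => simp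
  | cons x xs ih =>
    simp only [List.foldl_cons]
    rw [ih]
    simp only [List.length_cons, List.range_succ_eq_map, List.map_cons, List.map_map,
      Prod.mk.injEq]
    constructor
    · simp [Function.comp_def, List.append_assoc, add_assoc]
    · simp [add_assoc]

theorem build_ps_eq (nums : List Int) :
    build_ps nums = (List.range nums.length).map (fun k => ((nums.take (k + 1)).sum)) := by
  rw [build_ps, build_ps_aux]
  simp

theorem sum_interval (nums : List Int) (l r : Nat) (hl : l ≤ r) (hr : r < nums.length) :
    (nums.take (r + 1)).sum - (nums.take (l + 1)).sum + nums.getD l 0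
      = ((nums.drop l).take (r + 1 - l)).sum := by
  have h1 : nums.take (r + 1) = nums.take l ++ (nums.drop l).take (r + 1 - l) := by
    rw [← List.take_add]
    congr 1
    omega
  have h2 : nums.take (l + 1) = nums.take l ++ (nums.drop l).take 1 := List.take_add ..
  have hln : l < nums.length := by omega
  have h3 : (nums.drop l).take 1 = [nums.getD l 0] := by
    rw [List.drop_eq_getElem_cons hln, List.take_succ_cons, List.take_zero]
    simp [List.getD, List.getElem?_eq_getElem hln]
  rw [h1, h2, h3]
  simp [List.sum_append]

-- ===== VERDICT (by name: the statement is the Claim_ definition above) =====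
theorem max_sum_min_pdct_spec : Claim_equal_max_sum_min_pdct := by
  unfold Claim_equal_max_sum_min_pdct Spec_max_sum_min_pdct
  intro nums _
  by_cases hnil : nums = []
  · subst hnil
    show max_sum_min_pdct [] = max_sum_min_pdct_alt []
    rw [max_sum_min_pdct, if_pos rfl, max_sum_min_pdct_alt]
    norm_num [PySem.Int.mod, PySem.Int.floordiv]
  · rw [max_sum_min_pdct, if_neg hnil, max_sum_min_pdct_alt]
    simp only []
    congr 1
    rw [forward_fold, build_ps_eq]
    have hbw := backward_fold_aux nums nums.length (le_refl _)
    rw [Nat.sub_self, ← List.range_eq_range'] at hbw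
    rw [hbw]
    apply List.foldl_ext
    intro acc i hmem
    have hi : i < nums.length := List.mem_range.mp hmem
    simp only []
    have hlt : ((List.range nums.length).map (ltA nums)).getD i 0 = ltA nums i :=
      PySem.List.getD_map_range _ _ _ _ hi
    have hrt : ((List.range nums.length).map (rtA nums)).getD i 0 = rtA nums i :=
      PySem.List.getD_map_range _ _ _ _ hi
    rw [hlt, hrt, ltA_eq_lscan nums i, rtA_eq_rscan nums i hi]
    have hl := lscan_le nums (nums.getD i 0) i
    obtain ⟨hr1, hr2, _, _⟩ := rscan_spec nums (nums.getD i 0) i hi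
    have hlr : lscan nums (nums.getD i 0) i ≤ rscan nums (nums.getD i 0) i := le_trans hl hr1
    have hll : lscan nums (nums.getD i 0) i < nums.length := by omega
    have hpsr : ((List.range nums.length).map fun k => (nums.take (k + 1)).sum).getD
        (rscan nums (nums.getD i 0) i) 0 = (nums.take (rscan nums (nums.getD i 0) i + 1)).sum :=
      PySem.List.getD_map_range _ _ _ _ hr2
    have hpsl : ((List.range nums.length).map fun k => (nums.take (k + 1)).sum).getD
        (lscan nums (nums.getD i 0) i) 0 = (nums.take (lscan nums (nums.getD i 0) i + 1)).sum :=
      PySem.List.getD_map_range _ _ _ _ hll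
    rw [hpsr, hpsl, sum_interval nums _ _ hlr hr2]
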